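-- pv_equiv track=rewrite | github.com/EdwardG5/Project85 | Edward/compressionV2.py | redoInsertions
-- ===== SOURCE A (Python) =====
-- def redoInsertions(dna, insertions):
--     if insertions == []:
--         return dna
--     else:
--         (position, s) = insertions.pop()
--         before, after = dna[:position], dna[position:]
--         rec = redoInsertions(before, insertions)
--         return rec+list(s)+after
-- ===== SOURCE B (Python) =====
-- def redoInsertions(dna, insertions):
--     # One pass over the insertions from the back, tracking only the cut index
--     # into the ORIGINAL dna (no repeated slicing of shrinking copies), then one
--     # final concatenation. Unlike A, this does not mutate `insertions`.
--     L = len(dna)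
--     tail = []
--     for position, s in reversed(insertions):
--         i = position + L if position < 0 else position
--         i = 0 if i < 0 else (L if i > L else i)
--         tail.append(dna[i:L])
--         tail.append(list(s))
--         L = i
--     out = dna[:L]
--     for piece in reversed(tail):
--         out.extend(piece)
--     return out
-- ===== Notes on version B (the rewrite author's own statement) =====
-- stated objective: faster
-- what changed: Replaces A's recursion that rebuilds ever-shrinking list copies (dna[:p] at each level, then re-concatenating rec+list(s)+after) by a single reverse pass that only tracks the clamped cut index into the original dna, collects the suffix pieces, and concatenates once at the end; B also does not mutate the insertions list, while A empties it.
import Mathlib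
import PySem

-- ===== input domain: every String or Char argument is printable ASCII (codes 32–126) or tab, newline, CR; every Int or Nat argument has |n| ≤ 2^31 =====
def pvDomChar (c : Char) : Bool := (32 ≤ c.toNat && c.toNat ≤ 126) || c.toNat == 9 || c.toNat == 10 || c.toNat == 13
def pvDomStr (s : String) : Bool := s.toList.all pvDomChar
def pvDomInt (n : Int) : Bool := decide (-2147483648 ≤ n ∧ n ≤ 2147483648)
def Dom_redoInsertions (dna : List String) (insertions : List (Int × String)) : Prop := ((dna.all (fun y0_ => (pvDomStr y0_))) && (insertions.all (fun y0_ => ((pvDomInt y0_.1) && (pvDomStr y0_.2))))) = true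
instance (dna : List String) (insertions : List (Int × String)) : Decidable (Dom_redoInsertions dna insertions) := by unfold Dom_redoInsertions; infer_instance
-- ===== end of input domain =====

-- B replaces A's recursive re-slicing by one reverse pass over the insertions that tracks
-- only the cut index into the original dna, then concatenates once (objective: faster).
-- Equivalence is about the RETURN value: Python A empties `insertions` in place, B does not.

-- list(s): a string viewed as the list of its one-character strings (used by both ports)
def pyChars (s : String) : List String := s.toList.map (fun c => String.ofList [c])

-- ===== PORT A =====
def redoInsertions (dna : List String) (insertions : List (Int × String)) : List String :=
  if h : insertions = [] then dna
  else
    let ps := insertions.getLast h            -- insertions.pop()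
    let before := PySem.List.slice dna none (some ps.1)
    let after := PySem.List.slice dna (some ps.1) none
    redoInsertions before insertions.dropLast ++ pyChars ps.2 ++ after
termination_by insertions.length
decreasing_by
  have : insertions.length ≠ 0 := fun h0 => h (List.eq_nil_of_length_eq_zero h0)
  simp [List.length_dropLast]; omega

-- ===== PORT B =====
-- python: i = position + L if position < 0 else position; i = 0 if i < 0 else (L if i > L else i)
def pyCut (L : Nat) (position : Int) : Nat :=
  let i0 : Int := if position < 0 then position + L else position
  if i0 < 0 then 0 else if i0 > (L : Int) then L else i0.toNat

-- the for-loop over reversed(insertions): state (L, tail)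
def redoInsertionsAltLoop (dna : List String) (rev : List (Int × String)) (L : Nat)
    (tail : List (List String)) : Nat × List (List String) :=
  match rev with
  | [] => (L, tail)
  | (position, s) :: rest =>
    let i : Nat := pyCut L position
    redoInsertionsAltLoop dna rest i (tail ++ [(dna.drop i).take (L - i), pyChars s])

def redoInsertions_alt (dna : List String) (insertions : List (Int × String)) : List String :=
  let r := redoInsertionsAltLoop dna insertions.reverse dna.length []
  r.2.reverse.foldl (fun out piece => out ++ piece) (dna.take r.1)

-- ===== PRECONDITION & SPEC =====
def Spec_redoInsertions (dna : List String) (insertions : List (Int × String)) (out : List String) : Prop := out = redoInsertions_alt dna insertions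
instance (dna : List String) (insertions : List (Int × String)) (out : List String) : Decidable (Spec_redoInsertions dna insertions out) := by unfold Spec_redoInsertions; infer_instance

-- ===== CLAIM (what is proved, stated in full; the proofs are below) =====
def Claim_equal_redoInsertions : Prop := ∀ (dna : List String) (insertions : List (Int × String)), Dom_redoInsertions dna insertions → Spec_redoInsertions dna insertions (redoInsertions dna insertions)

-- ===== LEMMAS AND PROOFS =====

-- common intermediate form: process rev (insertions back-to-front) against dna truncated at L
def pvF (dna : List String) (rev : List (Int × String)) (L : Nat) : List String :=
  match rev with
  | [] => dna.take L
  | (p, s) :: rest =>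
    let i := PySem.List.clampIdx L p
    pvF dna rest i ++ pyChars s ++ (dna.drop i).take (L - i)

theorem pvClamp_eq (L : Nat) (p : Int) : pyCut L p = PySem.List.clampIdx L p := by
  simp only [pyCut, PySem.List.clampIdx]
  split_ifs <;> omega

theorem pvSlice_to (xs : List String) (p : Int) :
    PySem.List.slice xs none (some p) = xs.take (PySem.List.clampIdx xs.length p) := by
  simp [PySem.List.slice]

theorem pvSlice_from (xs : List String) (p : Int) :
    PySem.List.slice xs (some p) none = xs.drop (PySem.List.clampIdx xs.length p) := by
  simp only [PySem.List.slice]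
  have : (xs.drop (PySem.List.clampIdx xs.length p)).length
      = xs.length - PySem.List.clampIdx xs.length p := List.length_drop ..
  conv_lhs => rw [← this]
  exact List.take_length

theorem pvClampIdx_le (L : Nat) (p : Int) : PySem.List.clampIdx L p ≤ L := by
  simp only [PySem.List.clampIdx]; split_ifs <;> omega

theorem pvA_eq_F (rev : List (Int × String)) (dna : List String) (L : Nat) (hL : L ≤ dna.length) :
    redoInsertions (dna.take L) rev.reverse = pvF dna rev L := by
  induction rev generalizing L with
  | nil => simp [redoInsertions, pvF]
  | cons ps rest ih =>
    obtain ⟨p, s⟩ := ps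
    have hlen : (dna.take L).length = L := by simp [hL]
    have hne : rest.reverse ++ [(p, s)] ≠ [] := by simp
    set i := PySem.List.clampIdx L p with hi
    have hiL : i ≤ L := pvClampIdx_le L p
    have hbefore : PySem.List.slice (dna.take L) none (some p) = dna.take i := by
      rw [pvSlice_to, hlen, ← hi, List.take_take, min_eq_left hiL]
    have hafter : PySem.List.slice (dna.take L) (some p) none = (dna.drop i).take (L - i) := by
      rw [pvSlice_from, hlen, ← hi, List.drop_take]
    rw [List.reverse_cons, redoInsertions, dif_neg hne]
    simp only [List.getLast_concat, List.dropLast_concat]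
    rw [hbefore, hafter, ih i (le_trans hiL hL)]
    simp only [pvF]
    rw [← hi]

theorem pvFoldl_append (t : List (List String)) (a : List String) :
    t.foldl (fun out piece => out ++ piece) a = a ++ t.flatten := by
  induction t generalizing a with
  | nil => simp
  | cons x xs ih => simp [List.foldl_cons, ih, List.append_assoc]

theorem pvLoop_spec (rev : List (Int × String)) (dna : List String) (L : Nat)
    (tail : List (List String)) :
    dna.take (redoInsertionsAltLoop dna rev L tail).1
      ++ (redoInsertionsAltLoop dna rev L tail).2.reverse.flatten
    = pvF dna rev L ++ tail.reverse.flatten := by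
  induction rev generalizing L tail with
  | nil => rfl
  | cons ps rest ih =>
    obtain ⟨p, s⟩ := ps
    simp only [redoInsertionsAltLoop, pvClamp_eq]
    set i := PySem.List.clampIdx L p with hi
    rw [ih i]
    simp [pvF, List.append_assoc, ← hi]

theorem redoInsertions_spec' (dna : List String) (insertions : List (Int × String)) :
    redoInsertions dna insertions = redoInsertions_alt dna insertions := by
  have hA : redoInsertions dna insertions = pvF dna insertions.reverse dna.length := by
    have := pvA_eq_F insertions.reverse dna dna.length (le_refl _)
    rwa [List.reverse_reverse, List.take_length] at this
  have hB := pvLoop_spec insertions.reverse dna dna.length []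
  simp only [List.reverse_nil, List.flatten_nil, List.append_nil] at hB
  rw [hA]
  have hu : redoInsertions_alt dna insertions
      = (redoInsertionsAltLoop dna insertions.reverse dna.length []).2.reverse.foldl
          (fun out piece => out ++ piece)
          (dna.take (redoInsertionsAltLoop dna insertions.reverse dna.length []).1) := rfl
  rw [hu, pvFoldl_append, hB]

-- ===== VERDICT (by name: the statement is the Claim_ definition above) =====
theorem redoInsertions_spec : Claim_equal_redoInsertions := by
  intro dna insertions _
  exact redoInsertions_spec' dna insertions
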